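-- pv_equiv track=rewrite | github.com/joonyi/Leetcode | 375GuessNumII.py | getMoneyAmount3
-- ===== SOURCE A (Python) =====
-- def getMoneyAmount3(n: int) -> int:
--     def dp(lo, hi):
--         if lo >= hi:
--             return 0
--         if need[lo][hi] != 0:
--             return need[lo][hi]
--         cost = []
--         for x in range(lo, hi):
--             cost.append(x + max(dp(lo, x - 1), dp(x + 1, hi)))
--         need[lo][hi] = min(cost)
--         return need[lo][hi]
--
--     need = [[0] * (n + 1) for _ in range(n + 1)]
--     return dp(1, n)
-- ===== SOURCE B (Python) =====
-- def getMoneyAmount3(n: int) -> int: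
--     # Iterative bottom-up interval DP: fill a table by increasing interval length.
--     if n < 2:
--         return 0
--     cost = [[0] * (n + 1) for _ in range(n + 1)]
--     for length in range(2, n + 1):
--         for lo in range(1, n - length + 2):
--             hi = lo + length - 1
--             cost[lo][hi] = min(
--                 x + max(cost[lo][x - 1], cost[x + 1][hi])
--                 for x in range(lo, hi)
--             )
--     return cost[1][n]
-- ===== Notes on version B (the rewrite author's own statement) =====
-- stated objective: alternative
-- what changed: Replaces A's memoized top-down recursion over subintervals with an iterative bottom-up interval DP that fills a table by increasing interval length, removing recursion and the memo-hit check.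
import Mathlib
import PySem

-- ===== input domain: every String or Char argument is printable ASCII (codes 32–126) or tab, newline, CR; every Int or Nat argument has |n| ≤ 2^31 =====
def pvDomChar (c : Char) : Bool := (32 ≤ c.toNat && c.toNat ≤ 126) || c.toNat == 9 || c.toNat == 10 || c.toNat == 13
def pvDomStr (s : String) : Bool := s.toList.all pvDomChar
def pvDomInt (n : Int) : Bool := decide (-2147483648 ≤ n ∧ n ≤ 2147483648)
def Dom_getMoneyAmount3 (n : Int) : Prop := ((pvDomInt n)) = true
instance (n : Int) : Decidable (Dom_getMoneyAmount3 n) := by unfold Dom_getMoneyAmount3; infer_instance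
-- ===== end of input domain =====

-- B replaces A's memoized top-down recursion by an iterative bottom-up interval DP
-- (objective: alternative, same asymptotic cost).

-- Python's min(xs) on the nonempty lists both programs build ([] is unreachable).
def pyMin (l : List Int) : Int :=
  match l with
  | [] => 0
  | a :: t => t.foldl min a

-- ===== PORT A =====
-- A's list-of-lists `need` is an Array of Arrays. Every index used below is
-- nonnegative whenever it is evaluated (indexing happens only with 1 ≤ lo < hi),
-- so `.toNat` is exact here.
def dpA (lo hi : Int) (need : Array (Array Int)) : Int × Array (Array Int) :=
  if lo ≥ hi then (0, need)
  else if (need[lo.toNat]!)[hi.toNat]! ≠ 0 then ((need[lo.toNat]!)[hi.toNat]!, need)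
  else
    let r := (PySem.List.pyRange lo hi).attach.foldl
      (fun (st : List Int × Array (Array Int)) xh =>
        let p1 := dpA lo (xh.1 - 1) st.2
        let p2 := dpA (xh.1 + 1) hi p1.2
        (st.1 ++ [xh.1 + max p1.1 p2.1], p2.2))
      ([], need)
    let m := pyMin r.1
    (m, r.2.set! lo.toNat ((r.2[lo.toNat]!).set! hi.toNat m))
termination_by (hi - lo).toNat
decreasing_by
  · have := (PySem.List.mem_pyRange_one.1 xh.2); omega
  · have := (PySem.List.mem_pyRange_one.1 xh.2); omega

def getMoneyAmount3 (n : Int) : Int :=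
  (dpA 1 n (Array.replicate (n + 1).toNat (Array.replicate (n + 1).toNat 0))).1

-- ===== PORT B =====
-- All indices are nonnegative where evaluated (1 ≤ lo, lo ≤ x < hi ≤ n), so `.toNat` is exact.
def getMoneyAmount3_alt (n : Int) : Int :=
  if n < 2 then 0
  else
    let cost := (PySem.List.pyRange 2 (n + 1)).foldl
      (fun cost len =>
        (PySem.List.pyRange 1 (n - len + 2)).foldl
          (fun (cost : Array (Array Int)) lo =>
            cost.set! lo.toNat ((cost[lo.toNat]!).set! (lo + len - 1).toNat
              (pyMin ((PySem.List.pyRange lo (lo + len - 1)).map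
                (fun x => x + max ((cost[lo.toNat]!)[(x - 1).toNat]!)
                  ((cost[(x + 1).toNat]!)[(lo + len - 1).toNat]!))))))
          cost)
      (Array.replicate (n + 1).toNat (Array.replicate (n + 1).toNat 0))
    (cost[(1 : Nat)]!)[n.toNat]!

-- ===== PRECONDITION & SPEC =====
def Spec_getMoneyAmount3 (n : Int) (out : Int) : Prop := out = getMoneyAmount3_alt n
instance (n : Int) (out : Int) : Decidable (Spec_getMoneyAmount3 n out) := by unfold Spec_getMoneyAmount3; infer_instance

-- ===== CLAIM (what is proved, stated in full; the proofs are below) =====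
def Claim_equal_getMoneyAmount3 : Prop := ∀ (n : Int), Dom_getMoneyAmount3 n → Spec_getMoneyAmount3 n (getMoneyAmount3 n)

-- ===== LEMMAS AND PROOFS =====

lemma pyRange_nil {a b : Int} (h : b ≤ a) : PySem.List.pyRange a b = [] := by
  simp [PySem.List.pyRange]; omega

lemma get!_set {α : Type} [Inhabited α] (a : Array α) (i j : Nat) (v : α) :
    (a.set! i v)[j]! = if i = j ∧ i < a.size then v else a[j]! := by
  simp only [Array.set!, Array.getElem!_eq_getD, Array.getD_eq_getD_getElem?,
    Array.getElem?_setIfInBounds]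
  split_ifs <;> simp_all <;> omega

lemma get!_replicate {α : Type} [Inhabited α] (m : Nat) (v : α) (i : Nat) :
    (Array.replicate m v)[i]! = if i < m then v else default := by
  simp only [Array.getElem!_eq_getD, Array.getD_eq_getD_getElem?, Array.getElem?_replicate]
  split_ifs <;> simp

lemma get!_empty {α : Type} [Inhabited α] (i : Nat) : (#[] : Array α)[i]! = default := by
  simp [Array.getElem!_eq_getD, Array.getD_eq_getD_getElem?]

lemma read_init (k i j : Nat) :
    ((Array.replicate k (Array.replicate k (0 : Int)))[i]!)[j]! = 0 := by
  rw [get!_replicate]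
  split_ifs
  · rw [get!_replicate]; split_ifs <;> rfl
  · show (default : Array Int)[j]! = 0
    exact get!_empty j

-- The pure interval-DP value both ports compute: G lo hi = min over x in [lo,hi)
-- of x + max (G lo (x-1)) (G (x+1) hi), and 0 on empty intervals.
def G (lo hi : Int) : Int :=
  if hi ≤ lo then 0
  else
    pyMin ((PySem.List.pyRange lo hi).attach.map
      (fun xh => xh.1 + max (G lo (xh.1 - 1)) (G (xh.1 + 1) hi)))
termination_by (hi - lo).toNat
decreasing_by
  · have := (PySem.List.mem_pyRange_one.1 xh.2); omega
  · have := (PySem.List.mem_pyRange_one.1 xh.2); omega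

def fG (lo hi x : Int) : Int := x + max (G lo (x - 1)) (G (x + 1) hi)

lemma G_base {lo hi : Int} (h : hi ≤ lo) : G lo hi = 0 := by
  rw [G]; simp [h]

lemma G_eq {lo hi : Int} (h : lo < hi) :
    G lo hi = pyMin ((PySem.List.pyRange lo hi).map (fG lo hi)) := by
  rw [G, if_neg (by omega)]
  unfold fG
  congr 1
  exact List.attach_map_val (f := fun x => x + max (G lo (x - 1)) (G (x + 1) hi))

def InvA (need : Array (Array Int)) : Prop :=
  ∀ lo hi : Int, 0 ≤ lo → 0 ≤ hi → (need[lo.toNat]!)[hi.toNat]! ≠ 0 →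
    (need[lo.toNat]!)[hi.toNat]! = G lo hi

-- writing the correct value G lo hi at (lo, hi) preserves InvA
lemma InvA_write {need : Array (Array Int)} {lo hi : Int} (h1 : 1 ≤ lo) (hlt : lo < hi)
    (hm : InvA need) (v : Int) (hveq : v = G lo hi) :
    InvA (need.set! lo.toNat ((need[lo.toNat]!).set! hi.toNat v)) := by
  intro lo' hi' h0lo h0hi
  rw [get!_set]
  split_ifs with hout
  · rw [get!_set]
    split_ifs with hin
    · intro _
      have e1 : lo' = lo := by omega
      have e2 : hi' = hi := by omega
      rw [e1, e2]
      exact hveq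
    · have : lo.toNat = lo'.toNat := hout.1
      rw [this]
      exact hm lo' hi' h0lo h0hi
  · exact hm lo' hi' h0lo h0hi

lemma dpA_correct : ∀ g (lo hi : Int) need, (hi - lo).toNat = g → 1 ≤ lo → InvA need →
    (dpA lo hi need).1 = G lo hi ∧ InvA (dpA lo hi need).2 := by
  intro g
  induction g using Nat.strong_induction_on with
  | _ g IH =>
    intro lo hi need hg h1 hmem
    rw [dpA]
    by_cases hge : lo ≥ hi
    · simp only [if_pos hge]
      exact ⟨(G_base hge).symm, hmem⟩
    · have hlt : lo < hi := by omega
      simp only [if_neg hge]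
      by_cases hgd : (need[lo.toNat]!)[hi.toNat]! ≠ 0
      · simp only [if_pos hgd]
        exact ⟨hmem lo hi (by omega) (by omega) hgd, hmem⟩
      · simp only [if_neg hgd]
        have hfold : ∀ (l : List {x // x ∈ PySem.List.pyRange lo hi}) (cs : List Int)
            (m : Array (Array Int)), InvA m →
            ∃ m', l.foldl
              (fun (st : List Int × Array (Array Int)) xh =>
                let p1 := dpA lo (xh.1 - 1) st.2
                let p2 := dpA (xh.1 + 1) hi p1.2
                (st.1 ++ [xh.1 + max p1.1 p2.1], p2.2))
              (cs, m)
              = (cs ++ l.map (fun xh => fG lo hi xh.1), m') ∧ InvA m' := by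
          intro l
          induction l with
          | nil => intro cs m hm; exact ⟨m, by simp, hm⟩
          | cons xh l ih =>
            intro cs m hm
            have hx := PySem.List.mem_pyRange_one.1 xh.2
            have H1 := IH ((xh.1 - 1) - lo).toNat (by omega) lo (xh.1 - 1) m rfl h1 hm
            have H2 := IH (hi - (xh.1 + 1)).toNat (by omega) (xh.1 + 1) hi
              (dpA lo (xh.1 - 1) m).2 rfl (by omega) H1.2
            obtain ⟨m', hf, hm'⟩ := ih (cs ++ [fG lo hi xh.1]) _ H2.2
            refine ⟨m', ?_, hm'⟩
            simp only [List.foldl_cons]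
            rw [H1.1, H2.1]
            simpa [fG] using hf
        obtain ⟨m', hf, hm'⟩ := hfold (PySem.List.pyRange lo hi).attach [] need hmem
        simp only [hf, List.nil_append]
        have hv : pyMin ((PySem.List.pyRange lo hi).attach.map (fun xh => fG lo hi xh.1))
            = G lo hi := by
          rw [G_eq hlt]
          congr 1
          exact List.attach_map_val (f := fG lo hi)
        exact ⟨hv, InvA_write h1 hlt hm' _ hv⟩

lemma A_eq_G (n : Int) : getMoneyAmount3 n = G 1 n := by
  have h := dpA_correct ((n - 1).toNat) 1 n
    (Array.replicate (n + 1).toNat (Array.replicate (n + 1).toNat 0)) rfl le_rfl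
    (by intro lo hi _ _ hne; exact absurd (read_init ..) hne)
  exact h.1

-- ---- B side ----

-- row-size invariant of B's table
def SzB (n : Int) (t : Array (Array Int)) : Prop :=
  t.size = (n + 1).toNat ∧ ∀ i : Nat, i < t.size → (t[i]!).size = (n + 1).toNat

-- invariant after processing all interval lengths ≤ L
def InvB (n L : Int) (t : Array (Array Int)) : Prop :=
  ∀ lo hi : Int, 0 ≤ lo → 0 ≤ hi →
    (t[lo.toNat]!)[hi.toNat]! =
      if 1 ≤ lo ∧ lo < hi ∧ hi ≤ n ∧ hi - lo + 1 ≤ L then G lo hi else 0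

-- invariant during the inner loop of B (length `len`, lo's below `b` already done)
def Inv2 (n len b : Int) (t : Array (Array Int)) : Prop :=
  ∀ lo hi : Int, 0 ≤ lo → 0 ≤ hi →
    (t[lo.toNat]!)[hi.toNat]! =
      if (1 ≤ lo ∧ lo < hi ∧ hi ≤ n ∧ hi - lo + 1 ≤ len - 1) ∨
         (1 ≤ lo ∧ lo < b ∧ hi = lo + len - 1) then G lo hi else 0

lemma SzB_set {n : Int} {t : Array (Array Int)} (h : SzB n t) (i j : Nat) (v : Int) :
    SzB n (t.set! i ((t[i]!).set! j v)) := by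
  refine ⟨by rw [Array.set!, Array.size_setIfInBounds]; exact h.1, ?_⟩
  intro i' hi'
  rw [Array.set!, Array.size_setIfInBounds] at hi'
  rw [get!_set]
  split_ifs with hc
  · rw [Array.set!, Array.size_setIfInBounds]
    exact h.2 i (by omega)
  · exact h.2 i' hi'

lemma innerB (n len : Int) (h2 : 2 ≤ len) (hn : len ≤ n) :
    ∀ (k : Nat) (t : Array (Array Int)), SzB n t → Inv2 n len 1 t →
      (1 : Int) + k ≤ n - len + 2 →
      SzB n ((PySem.List.pyRange 1 (1 + k)).foldl
          (fun (cost : Array (Array Int)) lo =>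
            cost.set! lo.toNat ((cost[lo.toNat]!).set! (lo + len - 1).toNat
              (pyMin ((PySem.List.pyRange lo (lo + len - 1)).map
                (fun x => x + max ((cost[lo.toNat]!)[(x - 1).toNat]!)
                  ((cost[(x + 1).toNat]!)[(lo + len - 1).toNat]!))))))
          t) ∧
      Inv2 n len (1 + k)
        ((PySem.List.pyRange 1 (1 + k)).foldl
          (fun (cost : Array (Array Int)) lo =>
            cost.set! lo.toNat ((cost[lo.toNat]!).set! (lo + len - 1).toNat
              (pyMin ((PySem.List.pyRange lo (lo + len - 1)).map
                (fun x => x + max ((cost[lo.toNat]!)[(x - 1).toNat]!)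
                  ((cost[(x + 1).toNat]!)[(lo + len - 1).toNat]!))))))
          t) := by
  intro k
  induction k with
  | zero =>
    intro t hsz ht _
    rw [show ((1 : Int) + (0 : Nat)) = 1 by norm_num, pyRange_nil le_rfl]
    exact ⟨hsz, ht⟩
  | succ k ih =>
    intro t hsz ht hk
    have hk' : (1 : Int) + k ≤ n - len + 2 := by push_cast at hk ⊢; omega
    obtain ⟨hszp, hprev⟩ := ih t hsz ht hk'
    set lo0 : Int := 1 + k with hlo0
    have hcast : ((1 : Int) + ((k + 1 : Nat) : Int)) = lo0 + 1 := by push_cast; omega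
    rw [hcast, PySem.List.pyRange_one_succ_right (by omega), List.foldl_append,
      List.foldl_cons, List.foldl_nil]
    set prev := (PySem.List.pyRange 1 (1 + (k : Int))).foldl _ t with hprevdef
    have hlo0le : lo0 ≤ n - len + 1 := by push_cast at hk; omega
    have hval : pyMin ((PySem.List.pyRange lo0 (lo0 + len - 1)).map
        (fun x => x + max ((prev[lo0.toNat]!)[(x - 1).toNat]!)
          ((prev[(x + 1).toNat]!)[(lo0 + len - 1).toNat]!)))
        = G lo0 (lo0 + len - 1) := by
      rw [G_eq (by omega)]
      congr 1
      apply List.map_congr_left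
      intro x hx
      have hx' := PySem.List.mem_pyRange_one.1 hx
      unfold fG
      have hL : (prev[lo0.toNat]!)[(x - 1).toNat]! = G lo0 (x - 1) := by
        rw [hprev lo0 (x - 1) (by omega) (by omega)]
        by_cases hc : lo0 < x - 1
        · rw [if_pos (Or.inl ⟨by omega, hc, by omega, by omega⟩)]
        · rw [if_neg (by rintro (h | h) <;> omega), G_base (by omega)]
      have hR : (prev[(x + 1).toNat]!)[(lo0 + len - 1).toNat]! = G (x + 1) (lo0 + len - 1) := by
        rw [hprev (x + 1) (lo0 + len - 1) (by omega) (by omega)]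
        by_cases hc : x + 1 < lo0 + len - 1
        · rw [if_pos (Or.inl ⟨by omega, hc, by omega, by omega⟩)]
        · rw [if_neg (by rintro (h | h) <;> omega), G_base (by omega)]
      rw [hL, hR]
    rw [hval]
    refine ⟨SzB_set hszp _ _ _, ?_⟩
    intro lo hi h0lo h0hi
    have hsz1 : lo0.toNat < prev.size := by rw [hszp.1]; omega
    have hsz2 : (lo0 + len - 1).toNat < (prev[lo0.toNat]!).size := by
      rw [hszp.2 lo0.toNat hsz1]; omega
    rw [get!_set]
    by_cases hout : lo0.toNat = lo.toNat ∧ lo0.toNat < prev.size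
    · rw [if_pos hout, get!_set]
      by_cases hin : (lo0 + len - 1).toNat = hi.toNat ∧
          (lo0 + len - 1).toNat < (prev[lo0.toNat]!).size
      · rw [if_pos hin]
        have he1 : lo = lo0 := by omega
        have he2 : hi = lo0 + len - 1 := by omega
        rw [if_pos (Or.inr ⟨by omega, by omega, by omega⟩), he1, he2]
      · rw [if_neg hin]
        have hlolo : lo = lo0 := by omega
        have hne : hi ≠ lo0 + len - 1 := by
          intro ha
          exact hin ⟨by omega, hsz2⟩
        have : lo0.toNat = lo.toNat := hout.1
        rw [this, hprev lo hi h0lo h0hi]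
        congr 1
        simp only [eq_iff_iff]
        constructor
        · rintro (h | h)
          · exact Or.inl h
          · exact Or.inr ⟨h.1, by omega, h.2.2⟩
        · rintro (h | h)
          · exact Or.inl h
          · exact Or.inr ⟨h.1, by omega, h.2.2⟩
    · rw [if_neg hout, hprev lo hi h0lo h0hi]
      have hne : ¬(lo = lo0) := by
        intro he
        exact hout ⟨by omega, hsz1⟩
      congr 1
      simp only [eq_iff_iff]
      constructor
      · rintro (h | h)
        · exact Or.inl h
        · exact Or.inr ⟨h.1, by omega, h.2.2⟩
      · rintro (h | h)
        · exact Or.inl h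
        · exact Or.inr ⟨h.1, by omega, h.2.2⟩

lemma InvB_to_Inv2 {n len : Int} {t} (h : InvB n (len - 1) t) : Inv2 n len 1 t := by
  intro lo hi h0lo h0hi
  rw [h lo hi h0lo h0hi]
  congr 1
  simp only [eq_iff_iff]
  constructor
  · exact Or.inl
  · rintro (h | h); exact h; omega

lemma Inv2_to_InvB {n len : Int} {t} (h2 : 2 ≤ len) (h : Inv2 n len (n - len + 2) t) :
    InvB n len t := by
  intro lo hi h0lo h0hi
  rw [h lo hi h0lo h0hi]
  congr 1
  simp only [eq_iff_iff]
  constructor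
  · rintro (h | h)
    · exact ⟨h.1, h.2.1, h.2.2.1, by omega⟩
    · exact ⟨h.1, by omega, by omega, by omega⟩
  · rintro ⟨ha, hb, hc, hd⟩
    rcases lt_or_eq_of_le (by omega : hi - lo + 1 ≤ len) with h | h
    · exact Or.inl ⟨ha, hb, hc, by omega⟩
    · exact Or.inr ⟨ha, by omega, by omega⟩

lemma outerB (n : Int) : ∀ (m : Nat), 2 + (m : Int) ≤ n + 1 →
    SzB n ((PySem.List.pyRange 2 (2 + m)).foldl
        (fun cost len =>
          (PySem.List.pyRange 1 (n - len + 2)).foldl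
            (fun (cost : Array (Array Int)) lo =>
              cost.set! lo.toNat ((cost[lo.toNat]!).set! (lo + len - 1).toNat
                (pyMin ((PySem.List.pyRange lo (lo + len - 1)).map
                  (fun x => x + max ((cost[lo.toNat]!)[(x - 1).toNat]!)
                    ((cost[(x + 1).toNat]!)[(lo + len - 1).toNat]!))))))
            cost)
        (Array.replicate (n + 1).toNat (Array.replicate (n + 1).toNat 0))) ∧
    InvB n (1 + m)
      ((PySem.List.pyRange 2 (2 + m)).foldl
        (fun cost len =>
          (PySem.List.pyRange 1 (n - len + 2)).foldl
            (fun (cost : Array (Array Int)) lo =>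
              cost.set! lo.toNat ((cost[lo.toNat]!).set! (lo + len - 1).toNat
                (pyMin ((PySem.List.pyRange lo (lo + len - 1)).map
                  (fun x => x + max ((cost[lo.toNat]!)[(x - 1).toNat]!)
                    ((cost[(x + 1).toNat]!)[(lo + len - 1).toNat]!))))))
            cost)
        (Array.replicate (n + 1).toNat (Array.replicate (n + 1).toNat 0))) := by
  intro m
  induction m with
  | zero =>
    intro _
    rw [show ((2 : Int) + (0 : Nat)) = 2 by norm_num, pyRange_nil le_rfl, List.foldl_nil]
    constructor
    · exact ⟨Array.size_replicate, by
        intro i hi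
        rw [Array.size_replicate] at hi
        rw [get!_replicate, if_pos hi, Array.size_replicate]⟩
    · intro lo hi _ _
      rw [read_init, if_neg (by push_cast; rintro ⟨_, _, _, _⟩; omega)]
  | succ m ih =>
    intro hm
    have hm' : 2 + (m : Int) ≤ n + 1 := by push_cast at hm ⊢; omega
    obtain ⟨hszp, hprev⟩ := ih hm'
    set len : Int := 2 + m with hlen
    have hcast : ((2 : Int) + ((m + 1 : Nat) : Int)) = len + 1 := by push_cast; omega
    rw [hcast, PySem.List.pyRange_one_succ_right (by omega), List.foldl_append,
      List.foldl_cons, List.foldl_nil]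
    have hlen2 : 2 ≤ len := by omega
    have hlenn : len ≤ n := by push_cast at hm; omega
    have h1 : Inv2 n len 1 _ := InvB_to_Inv2 (by
      have : len - 1 = 1 + (m : Int) := by omega
      rw [this]; exact hprev)
    have hk : (1 : Int) + ((n - len + 1).toNat : Int) = n - len + 2 := by omega
    have hres := innerB n len hlen2 hlenn (n - len + 1).toNat _ hszp h1 (by omega)
    rw [hk] at hres
    have hcast2 : (1 : Int) + ((m + 1 : Nat) : Int) = len := by push_cast; omega
    rw [hcast2]
    exact ⟨hres.1, Inv2_to_InvB hlen2 hres.2⟩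

lemma B_eq_G (n : Int) : getMoneyAmount3_alt n = G 1 n := by
  unfold getMoneyAmount3_alt
  by_cases hn : n < 2
  · rw [if_pos hn, G_base (by omega)]
  · rw [if_neg hn]
    have hm : ((2 : Int) + ((n - 1).toNat : Int)) = n + 1 := by omega
    have h := outerB n (n - 1).toNat (by omega)
    rw [hm] at h
    have hread := h.2 1 n (by omega) (by omega)
    rw [if_pos ⟨le_rfl, by omega, le_rfl, by omega⟩] at hread
    simpa using hread

-- ===== VERDICT (by name: the statement is the Claim_ definition above) =====
theorem getMoneyAmount3_spec : Claim_equal_getMoneyAmount3 := by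
  intro n _
  unfold Spec_getMoneyAmount3
  rw [A_eq_G, B_eq_G]
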